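-- pv_equiv track=rewrite | github.com/pyporn-san/mcdgram | main.py | makeButtons
-- ===== SOURCE A (Python) =====
-- def makeButtons(buttons, buttonTable):
--     buttons = iter(buttons)
--     Table = []
--     try:
--         for i in range(len(buttonTable)):
--             Table.append([])
--             for _ in range(buttonTable[i]):
--                 Table[i].append(next(buttons))
--         return Table
--     except StopIteration:
--         if(Table[-1] == []):
--             Table.pop()
--         return Table
-- ===== SOURCE B (Python) =====
-- def makeButtons(buttons, buttonTable):
--     # Return value only: B materializes the whole iterable (A consumes only as
--     # many elements as needed), observable only for lazy generators.
--     data = list(buttons)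
--     n = len(data)
--     rows = []
--     off = 0
--     for size in buttonTable:
--         s = max(size, 0)
--         if off + s <= n:
--             rows.append(data[off:off + s])
--             off += s
--         else:
--             if off < n:
--                 rows.append(data[off:n])
--             return rows
--     return rows
-- ===== Notes on version B (the rewrite author's own statement) =====
-- stated objective: alternative
-- what changed: Replaces the iterator/next()/try-except simulation by a materialized list with an integer offset and length-based slicing: each row is a slice data[off:off+size], and the first row that would overrun the list length ends the loop (keeping its non-empty remainder), with no exception handling.
import Mathlib
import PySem

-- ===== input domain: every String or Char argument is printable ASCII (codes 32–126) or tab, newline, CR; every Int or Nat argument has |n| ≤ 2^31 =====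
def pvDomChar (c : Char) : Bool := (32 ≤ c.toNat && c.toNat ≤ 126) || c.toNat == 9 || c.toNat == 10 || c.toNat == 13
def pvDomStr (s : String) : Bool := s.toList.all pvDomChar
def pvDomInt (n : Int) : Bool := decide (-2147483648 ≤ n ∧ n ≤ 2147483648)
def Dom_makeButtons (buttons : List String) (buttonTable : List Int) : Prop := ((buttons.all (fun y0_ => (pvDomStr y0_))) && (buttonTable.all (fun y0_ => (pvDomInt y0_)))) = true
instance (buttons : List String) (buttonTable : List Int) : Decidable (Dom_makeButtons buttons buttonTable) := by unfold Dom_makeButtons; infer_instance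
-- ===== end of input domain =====

-- B replaces A's iterator/next()/StopIteration simulation by offset-based slicing
-- over the materialized list (return value only: A consumes a lazy iterable only
-- partially, B materializes it; identical for list inputs).

-- ===== PORT A =====
-- inner loop `for _ in range(k): Table[i].append(next(buttons))`:
-- returns (row so far, remaining iterator, True) or, on StopIteration,
-- (row so far, [], False).
def innerA : Nat → List String → List String → (List String × List String × Bool)
  | 0, rem, row => (row, rem, true)
  | _ + 1, [], row => (row, [], false)
  | k + 1, b :: rem, row => innerA k rem (row ++ [b])

-- outer loop over buttonTable indices with state (remaining iterator, Table);
-- on StopIteration: pop last row if empty and return.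
def loopA : List Int → List String → List (List String) → List (List String)
  | [], _, tbl => tbl
  | s :: rest, rem, tbl =>
    match innerA s.toNat rem [] with  -- range(s) has s.toNat iterations
    | (row, rem', true) => loopA rest rem' (tbl ++ [row])
    | (row, _, false) =>
      if (tbl ++ [row]).getLast? = some [] then (tbl ++ [row]).dropLast else tbl ++ [row]

def makeButtons (buttons : List String) (buttonTable : List Int) : List (List String) :=
  loopA buttonTable buttons []

-- ===== PORT B =====
-- loop over buttonTable with an integer offset; data[a:b] with the maintained
-- 0 ≤ off ≤ n bounds is exactly (data.drop off).take (b - off).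
def loopB (data : List String) (n : Nat) : List Int → Nat → List (List String) → List (List String)
  | [], _, rows => rows
  | size :: rest, off, rows =>
    let s := size.toNat  -- max(size, 0)
    if off + s ≤ n then loopB data n rest (off + s) (rows ++ [(data.drop off).take s])
    else if off < n then rows ++ [(data.drop off).take (n - off)] else rows

def makeButtons_alt (buttons : List String) (buttonTable : List Int) : List (List String) :=
  loopB buttons buttons.length buttonTable 0 []

-- ===== PRECONDITION & SPEC =====
def Spec_makeButtons (buttons : List String) (buttonTable : List Int) (out : List (List String)) : Prop := out = makeButtons_alt buttons buttonTable
instance (buttons : List String) (buttonTable : List Int) (out : List (List String)) : Decidable (Spec_makeButtons buttons buttonTable out) := by unfold Spec_makeButtons; infer_instance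

-- ===== CLAIM (what is proved, stated in full; the proofs are below) =====
def Claim_equal_makeButtons : Prop := ∀ (buttons : List String) (buttonTable : List Int), Dom_makeButtons buttons buttonTable → Spec_makeButtons buttons buttonTable (makeButtons buttons buttonTable)

-- ===== LEMMAS AND PROOFS =====

lemma innerA_spec (k : Nat) : ∀ (rem row : List String),
    innerA k rem row =
      if k ≤ rem.length then (row ++ rem.take k, rem.drop k, true)
      else (row ++ rem, [], false) := by
  induction k with
  | zero => intro rem row; simp [innerA]
  | succ k ih =>
    intro rem row
    cases rem with
    | nil => simp [innerA]
    | cons b rem =>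
      simp only [innerA, ih]
      by_cases h : k ≤ rem.length
      · simp [h, Nat.succ_le_succ h]
      · simp [h]

lemma loop_eq (data : List String) : ∀ (table : List Int) (off : Nat) (acc : List (List String)),
    off ≤ data.length →
    loopA table (data.drop off) acc = loopB data data.length table off acc := by
  intro table
  induction table with
  | nil => intro off acc _; simp [loopA, loopB]
  | cons s rest ih =>
    intro off acc hoff
    have hlen : (data.drop off).length = data.length - off := by simp
    simp only [loopA, loopB, innerA_spec, hlen]
    by_cases h : off + s.toNat ≤ data.length
    · have h' : s.toNat ≤ data.length - off := by omega
      simp only [h', if_pos, h, List.nil_append]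
      have h2 := ih (off + s.toNat) (acc ++ [(data.drop off).take s.toNat]) (by omega)
      simpa [List.drop_drop, Nat.add_comm] using h2
    · have h' : ¬ s.toNat ≤ data.length - off := by omega
      simp only [h', if_neg, not_false_iff, h]
      have hdrop : (data.drop off).take (data.length - off) = data.drop off := by
        apply List.take_of_length_le; omega
      by_cases hlt : off < data.length
      · have hne : data.drop off ≠ [] := by
          intro hc
          have := congrArg List.length hc
          simp at this; omega
        simp [hlt, hdrop, List.getLast?_append, hne]
      · have hnil : data.drop off = [] := by
          apply List.drop_eq_nil_of_le; omega
        simp [hlt, hnil]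

-- ===== VERDICT (by name: the statement is the Claim_ definition above) =====
theorem makeButtons_spec : Claim_equal_makeButtons := by
  intro buttons buttonTable _
  unfold Spec_makeButtons makeButtons makeButtons_alt
  simpa using loop_eq buttons buttonTable 0 [] (Nat.zero_le _)
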